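-- pv_equiv track=rewrite | github.com/utahnlp/consistency | triple_confusion.py | get_confusion
-- ===== SOURCE A (Python) =====
-- def get_confusion(alpha, beta, gamma, labels):
-- 	groups = [alpha, beta, gamma]
--
-- 	all_cnts = []
-- 	for g in groups:
-- 		cnts = [0, 0, 0]
-- 		for p in g:
-- 			cnts[labels.index(p)] += 1
--
-- 		all_cnts.append(cnts)
-- 	return all_cnts
-- ===== SOURCE B (Python) =====
-- def get_confusion(alpha, beta, gamma, labels):
-- 	return [[sum(1 for p in g if labels.index(p) == i) for i in range(3)]
-- 	        for g in (alpha, beta, gamma)]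
-- ===== Notes on version B (the rewrite author's own statement) =====
-- stated objective: alternative
-- what changed: Replaces A's single scatter pass (increment cnts[labels.index(p)] per element) by three counting passes, one per label slot, each summing a membership predicate over the group; no mutable counts list.
import Mathlib
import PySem

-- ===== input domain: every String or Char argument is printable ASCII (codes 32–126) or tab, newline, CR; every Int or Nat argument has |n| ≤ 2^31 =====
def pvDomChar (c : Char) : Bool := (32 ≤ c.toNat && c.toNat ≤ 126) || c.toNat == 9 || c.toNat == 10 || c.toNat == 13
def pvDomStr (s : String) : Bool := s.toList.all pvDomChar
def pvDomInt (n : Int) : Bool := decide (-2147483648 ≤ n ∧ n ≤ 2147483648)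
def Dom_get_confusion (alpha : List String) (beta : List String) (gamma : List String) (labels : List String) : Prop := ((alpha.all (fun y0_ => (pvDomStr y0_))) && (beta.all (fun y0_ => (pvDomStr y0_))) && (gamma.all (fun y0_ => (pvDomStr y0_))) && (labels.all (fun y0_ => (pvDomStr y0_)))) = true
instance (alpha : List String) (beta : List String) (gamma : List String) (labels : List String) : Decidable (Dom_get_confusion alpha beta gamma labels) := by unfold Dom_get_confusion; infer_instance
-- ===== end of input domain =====

-- B replaces A's single scatter pass (cnts[labels.index(p)] += 1) by three counting passes,
-- one per label slot; same cost, different traversal. Pre_ excludes inputs where A raises.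


-- ===== PORT A =====
-- inner loop body: cnts[labels.index(p)] += 1 ; the two 'cnts' arms are the ValueError
-- (label missing) and IndexError (index out of range) cases, both excluded by Pre_
def pvStepA (labels : List String) (cnts : List Int) (p : String) : List Int :=
  match PySem.List.index? labels p with
  | some i =>
      match cnts[i]? with
      | some v => cnts.set i (v + 1)
      | none => cnts
  | none => cnts

def get_confusion (alpha : List String) (beta : List String) (gamma : List String) (labels : List String) : List (List Int) :=
  [alpha, beta, gamma].foldl
    (fun all_cnts g => all_cnts ++ [g.foldl (pvStepA labels) [0, 0, 0]]) []

-- ===== PORT B =====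
-- sum(1 for p in g if labels.index(p) == i); the 'none' arm is A's ValueError, excluded by Pre_
def pvCountLab (labels : List String) (g : List String) (i : Int) : Int :=
  g.foldl (fun acc p =>
    match PySem.List.index? labels p with
    | some k => if (k : Int) = i then acc + 1 else acc
    | none => acc) 0

def get_confusion_alt (alpha : List String) (beta : List String) (gamma : List String) (labels : List String) : List (List Int) :=
  [alpha, beta, gamma].map (fun g =>
    (PySem.List.pyRange 0 3 1).map (fun i => pvCountLab labels g i))

-- ===== PRECONDITION & SPEC =====
-- Pre_ excludes exactly the inputs on which A raises: an element absent from labels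
-- (ValueError from labels.index) or whose first index in labels is ≥ 3 (IndexError on cnts).
def Pre_get_confusion (alpha : List String) (beta : List String) (gamma : List String) (labels : List String) : Prop :=
  ∀ p ∈ alpha ++ beta ++ gamma, (PySem.List.index? labels p).getD 3 < 3
instance (alpha : List String) (beta : List String) (gamma : List String) (labels : List String) : Decidable (Pre_get_confusion alpha beta gamma labels) := by unfold Pre_get_confusion; infer_instance

def pvWitness_get_confusion : List String × List String × List String × List String :=
  (["a", "b"], ["c"], ["a", "a", "c"], ["a", "b", "c"])

def Spec_get_confusion (alpha : List String) (beta : List String) (gamma : List String) (labels : List String) (out : List (List Int)) : Prop := out = get_confusion_alt alpha beta gamma labels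
instance (alpha : List String) (beta : List String) (gamma : List String) (labels : List String) (out : List (List Int)) : Decidable (Spec_get_confusion alpha beta gamma labels out) := by unfold Spec_get_confusion; infer_instance

-- ===== CLAIM (what is proved, stated in full; the proofs are below) =====
def Claim_equal_get_confusion : Prop := ∀ (alpha : List String) (beta : List String) (gamma : List String) (labels : List String), Dom_get_confusion alpha beta gamma labels → Pre_get_confusion alpha beta gamma labels → Spec_get_confusion alpha beta gamma labels (get_confusion alpha beta gamma labels)

-- ===== LEMMAS AND PROOFS =====

-- shifting the accumulator out of B's counting fold
theorem pvCount_shift (labels : List String) (g : List String) (i : Int) (a : Int) :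
    g.foldl (fun acc p =>
      match PySem.List.index? labels p with
      | some k => if (k : Int) = i then acc + 1 else acc
      | none => acc) a = a + pvCountLab labels g i := by
  simp only [pvCountLab, PySem.List.index?_eq_idxOf?]
  induction g generalizing a with
  | nil => simp
  | cons p g ih =>
    simp only [List.foldl_cons]
    cases h : List.idxOf? p labels with
    | none => exact ih a
    | some k =>
      dsimp only
      by_cases hk : (k : Int) = i
      · rw [if_pos hk, if_pos hk, ih (a + 1), ih (0 + 1)]; omega
      · rw [if_neg hk, if_neg hk]; exact ih a

theorem pvCountLab_cons (labels : List String) (p : String) (g : List String) (i : Int) :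
    pvCountLab labels (p :: g) i =
      (match PySem.List.index? labels p with
       | some k => if (k : Int) = i then (1 : Int) else 0
       | none => 0) + pvCountLab labels g i := by
  conv_lhs => rw [pvCountLab]
  simp only [List.foldl_cons]
  rw [pvCount_shift]
  cases h : PySem.List.index? labels p with
  | none => rfl
  | some k => by_cases hk : (k : Int) = i <;> simp [hk]

-- the core invariant: A's scatter fold over g equals the three counts, shifted by the start state
theorem pvGroup_eq (labels : List String) (g : List String)
    (hg : ∀ p ∈ g, (PySem.List.index? labels p).getD 3 < 3) (a b c : Int) :
    g.foldl (pvStepA labels) [a, b, c] =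
      [a + pvCountLab labels g 0, b + pvCountLab labels g 1, c + pvCountLab labels g 2] := by
  induction g generalizing a b c with
  | nil => simp [pvCountLab]
  | cons p g ih =>
    have hp := hg p (List.mem_cons_self)
    have hg' : ∀ q ∈ g, (PySem.List.index? labels q).getD 3 < 3 :=
      fun q hq => hg q (List.mem_cons_of_mem _ hq)
    cases hsome : PySem.List.index? labels p with
    | none =>
      rw [hsome] at hp
      simp at hp
    | some k =>
      rw [hsome] at hp
      simp only [Option.getD_some] at hp
      simp only [List.foldl_cons]
      have hstep := hsome
      rw [PySem.List.index?_eq_idxOf?] at hstep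
      interval_cases k
      · rw [show pvStepA labels [a, b, c] p = [a + 1, b, c] by simp [pvStepA, hstep]]
        rw [ih hg']
        simp only [pvCountLab_cons, PySem.List.index?_eq_idxOf?, hstep]
        norm_num
        omega
      · rw [show pvStepA labels [a, b, c] p = [a, b + 1, c] by simp [pvStepA, hstep]]
        rw [ih hg']
        simp only [pvCountLab_cons, PySem.List.index?_eq_idxOf?, hstep]
        norm_num
        omega
      · rw [show pvStepA labels [a, b, c] p = [a, b, c + 1] by simp [pvStepA, hstep]]
        rw [ih hg']
        simp only [pvCountLab_cons, PySem.List.index?_eq_idxOf?, hstep]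
        norm_num
        omega

-- ===== VERDICT (by name: the statement is the Claim_ definition above) =====
theorem get_confusion_spec : Claim_equal_get_confusion := by
  intro alpha beta gamma labels _ hpre
  unfold Spec_get_confusion get_confusion get_confusion_alt
  have hr : PySem.List.pyRange 0 3 1 = [0, 1, 2] := by decide
  have ha : ∀ p ∈ alpha, (PySem.List.index? labels p).getD 3 < 3 := fun p hp => hpre p (by simp [hp])
  have hb : ∀ p ∈ beta, (PySem.List.index? labels p).getD 3 < 3 := fun p hp => hpre p (by simp [hp])
  have hc : ∀ p ∈ gamma, (PySem.List.index? labels p).getD 3 < 3 := fun p hp => hpre p (by simp [hp])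
  simp only [List.foldl_cons, List.foldl_nil, List.map_cons, List.map_nil, hr,
    List.nil_append]
  rw [pvGroup_eq labels alpha ha 0 0 0, pvGroup_eq labels beta hb 0 0 0,
    pvGroup_eq labels gamma hc 0 0 0]
  simp
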